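-- pv_equiv track=rewrite | github.com/mfernandasf/arquitetura-de-sistemas | intro-ao-python-exc-2/exercicio44.py | gera_lista_plural
-- ===== SOURCE A (Python) =====
-- def gera_lista_plural(palavras):
--     new_list = []
--
--     for i, palavra in enumerate(palavras):
--         if i % 2 != 0:
--             new_list.append(palavra + "s")
--         else:
--             new_list.append(palavra)
--
--     return new_list
-- ===== SOURCE B (Python) =====
-- _MISSING = object()
--
-- def gera_lista_plural(palavras):
--     # pairwise consumption: keep the even-positioned element, pluralize the
--     # odd-positioned one that follows it; no index counter or parity test
--     out = []
--     it = iter(palavras)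
--     for a in it:
--         out.append(a)
--         b = next(it, _MISSING)
--         if b is _MISSING:
--             break
--         out.append(b + "s")
--     return out
-- ===== Notes on version B (the rewrite author's own statement) =====
-- stated objective: alternative
-- what changed: Replaces the enumerate loop with an index-parity branch by a pairwise traversal that consumes two elements at a time (keep the first, pluralize the second), so no index counter or parity test exists.
import Mathlib
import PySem

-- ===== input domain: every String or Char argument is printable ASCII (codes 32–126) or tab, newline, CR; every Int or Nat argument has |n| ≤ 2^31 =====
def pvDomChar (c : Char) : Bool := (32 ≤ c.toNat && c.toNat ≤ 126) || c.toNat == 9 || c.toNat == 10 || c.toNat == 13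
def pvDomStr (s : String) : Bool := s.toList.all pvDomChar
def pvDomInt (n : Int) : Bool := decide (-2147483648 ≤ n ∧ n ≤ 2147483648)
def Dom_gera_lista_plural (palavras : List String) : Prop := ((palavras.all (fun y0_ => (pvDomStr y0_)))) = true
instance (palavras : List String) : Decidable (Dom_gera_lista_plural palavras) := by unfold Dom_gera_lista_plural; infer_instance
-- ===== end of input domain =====

-- B replaces A's enumerate loop with an index-parity branch by a pairwise recursion
-- consuming two elements at a time (keep the first, pluralize the second): alternative decomposition.

-- ===== PORT A =====
-- A: new_list = []; for i, palavra in enumerate(palavras): append palavra+"s" if i%2 != 0 else palavra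
def gera_lista_plural (palavras : List String) : List String :=
  (PySem.List.enumerate palavras 0).foldl
    (fun new_list ip =>
      if ip.1 % 2 ≠ 0 then new_list ++ [ip.2 ++ "s"] else new_list ++ [ip.2]) []

-- ===== PORT B =====
-- B: if len < 2 return copy; else [p[0], p[1]+"s"] + recurse on p[2:]
def gera_lista_plural_alt (palavras : List String) : List String :=
  match palavras with
  | [] => []
  | [a] => [a]
  | a :: b :: rest => a :: (b ++ "s") :: gera_lista_plural_alt rest

-- ===== PRECONDITION & SPEC =====
def Spec_gera_lista_plural (palavras : List String) (out : List String) : Prop := out = gera_lista_plural_alt palavras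
instance (palavras : List String) (out : List String) : Decidable (Spec_gera_lista_plural palavras out) := by unfold Spec_gera_lista_plural; infer_instance

-- ===== CLAIM (what is proved, stated in full; the proofs are below) =====
def Claim_equal_gera_lista_plural : Prop := ∀ (palavras : List String), Dom_gera_lista_plural palavras → Spec_gera_lista_plural palavras (gera_lista_plural palavras)

-- ===== LEMMAS AND PROOFS =====
theorem gera_lista_plural_loop : ∀ (l : List String) (acc : List String) (s : Int), s % 2 = 0 →
    (PySem.List.enumerate l s).foldl
      (fun new_list ip =>
        if ip.1 % 2 ≠ 0 then new_list ++ [ip.2 ++ "s"] else new_list ++ [ip.2]) acc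
      = acc ++ gera_lista_plural_alt l
  | [], acc, s, h => by simp [PySem.List.enumerate_nil, gera_lista_plural_alt]
  | [a], acc, s, h => by
      simp [PySem.List.enumerate_cons, PySem.List.enumerate_nil, gera_lista_plural_alt, h]
  | a :: b :: rest, acc, s, h => by
      have h1 : (s + 1) % 2 ≠ 0 := by omega
      have h2 : (s + 1 + 1) % 2 = 0 := by omega
      simp only [PySem.List.enumerate_cons, List.foldl_cons]
      rw [if_neg (show ¬ s % 2 ≠ 0 by omega), if_pos h1,
        gera_lista_plural_loop rest _ (s + 1 + 1) h2]
      simp [gera_lista_plural_alt]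

-- ===== VERDICT (by name: the statement is the Claim_ definition above) =====
theorem gera_lista_plural_spec : Claim_equal_gera_lista_plural := by
  intro palavras _
  unfold Spec_gera_lista_plural gera_lista_plural
  rw [gera_lista_plural_loop palavras [] 0 (by decide)]
  simp
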